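-- pv_equiv track=rewrite | github.com/pytorch/pytorch | pytorch-env/lib/python3.12/site-packages/networkx/generators/nonisomorphic_trees.py | _layout_to_matrix
-- ===== SOURCE A (Python) =====
-- def _layout_to_matrix(layout):
--     """Create the adjacency matrix for the tree specified by the
--     given layout (level sequence)."""
--
--     result = [[0] * len(layout) for i in range(len(layout))]
--     stack = []
--     for i in range(len(layout)):
--         i_level = layout[i]
--         if stack:
--             j = stack[-1]
--             j_level = layout[j]
--             while j_level >= i_level:
--                 stack.pop()
--                 j = stack[-1]
--                 j_level = layout[j]
--             result[i][j] = result[j][i] = 1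
--         stack.append(i)
--     return result
-- ===== SOURCE B (Python) =====
-- def _layout_to_matrix(layout):
--     """Create the adjacency matrix for the tree specified by the
--     given layout (level sequence)."""
--     n = len(layout)
--     result = [[0] * n for _ in range(n)]
--     for i in range(1, n):
--         j = [j for j in range(i) if layout[j] < layout[i]][-1]
--         result[i][j] = result[j][i] = 1
--     return result
-- ===== Notes on version B (the rewrite author's own statement) =====
-- stated objective: simpler
-- what changed: Drops A's cross-iteration stack and its while-loop popping: for each node i>0 the parent is found directly as the last earlier index with strictly smaller level (a per-node backward lookup), and the two symmetric entries are set; the empty lookup raises IndexError exactly where A's pop from an emptied stack does.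
import Mathlib
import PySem

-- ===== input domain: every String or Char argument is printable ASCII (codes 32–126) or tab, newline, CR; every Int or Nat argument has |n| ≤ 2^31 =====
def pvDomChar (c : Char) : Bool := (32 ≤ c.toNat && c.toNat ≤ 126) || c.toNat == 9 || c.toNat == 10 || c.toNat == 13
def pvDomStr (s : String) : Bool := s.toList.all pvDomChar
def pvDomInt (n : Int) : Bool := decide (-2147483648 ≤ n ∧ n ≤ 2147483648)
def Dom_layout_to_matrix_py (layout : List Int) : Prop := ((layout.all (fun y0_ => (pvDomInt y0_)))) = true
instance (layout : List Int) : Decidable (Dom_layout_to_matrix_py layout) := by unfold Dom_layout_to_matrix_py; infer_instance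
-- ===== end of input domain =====

-- B drops A's cross-iteration stack and its popping while-loop: each node i>0 links
-- directly to the last earlier index with strictly smaller level (objective: simpler).

-- ===== PORT A =====
-- the `while j_level >= i_level: stack.pop(); j = stack[-1]` loop: returns the new top
-- and the remaining stack; `none` when the stack is exhausted (Python raises IndexError
-- there, and when the stack was empty `if stack:` skips — both excluded/skipped below)
def pvFindPop (layout : List Int) (iLevel : Int) : List Nat → Option (Nat × List Nat)
  | [] => none
  | j :: rest =>
      if layout.getD j 0 ≥ iLevel then pvFindPop layout iLevel rest
      else some (j, j :: rest)

-- `result[i][j] = 1` (indices are always in range in A, so getD/set are exact)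
def pvSet1 (m : List (List Int)) (r c : Nat) : List (List Int) :=
  m.set r ((m.getD r []).set c 1)

-- one iteration of A's `for i in range(len(layout))` loop over the (result, stack) state
def pvStep (layout : List Int) (st : List (List Int) × List Nat) (i : Nat) :
    List (List Int) × List Nat :=
  let iLevel := layout.getD i 0
  match pvFindPop layout iLevel st.2 with
  | none => (st.1, i :: st.2)          -- `if stack:` false (or A raised: outside Pre_)
  | some (j, s') => (pvSet1 (pvSet1 st.1 i j) j i, i :: s')

def layout_to_matrix_py (layout : List Int) : List (List Int) :=
  let n := layout.length
  let init : List (List Int) := (List.range n).map (fun _ => List.replicate n 0)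
  ((List.range n).foldl (pvStep layout) (init, ([] : List Nat))).1

-- ===== PORT B =====
-- `[j for j in range(i) if layout[j] < layout[i]]` (the earlier indices with strictly
-- smaller level, in increasing order; its last element is B's `[-1]`)
def pvCands (layout : List Int) (i : Nat) : List Nat :=
  (List.range i).filter (fun j => layout.getD j 0 < layout.getD i 0)

def layout_to_matrix_py_alt (layout : List Int) : List (List Int) :=
  let n := layout.length
  let init : List (List Int) := (List.range n).map (fun _ => List.replicate n 0)
  -- `for i in range(1, n)`; `(pvCands layout i)[-1]` = getLast?; Python raises
  -- IndexError on `none` (outside Pre_), the port skips there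
  (List.range' 1 (n - 1)).foldl (fun R i =>
      match (pvCands layout i).getLast? with
      | none => R
      | some j => pvSet1 (pvSet1 R i j) j i
    ) init

-- ===== PRECONDITION & SPEC =====
-- Pre_ excludes exactly the inputs on which both Pythons raise IndexError (a position
-- i>0 with no earlier strictly smaller level: A pops from an emptied stack, B indexes
-- an empty list).
def Pre_layout_to_matrix_py (layout : List Int) : Prop :=
  ∀ i < layout.length, 0 < i → ∃ j < i, layout.getD j 0 < layout.getD i 0
instance (layout : List Int) : Decidable (Pre_layout_to_matrix_py layout) := by
  unfold Pre_layout_to_matrix_py; infer_instance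

def pvWitness_layout_to_matrix_py : List Int := [0, 1, 2, 1]

def Spec_layout_to_matrix_py (layout : List Int) (out : List (List Int)) : Prop :=
  out = layout_to_matrix_py_alt layout
instance (layout : List Int) (out : List (List Int)) : Decidable (Spec_layout_to_matrix_py layout out) := by
  unfold Spec_layout_to_matrix_py; infer_instance

-- ===== CLAIM (what is proved, stated in full; the proofs are below) =====
def Claim_equal_layout_to_matrix_py : Prop := ∀ (layout : List Int), Dom_layout_to_matrix_py layout → Pre_layout_to_matrix_py layout → Spec_layout_to_matrix_py layout (layout_to_matrix_py layout)

-- ===== LEMMAS AND PROOFS =====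

-- B's per-node lookup, as a backward scan (proof-side characterisation of pvCands)
def pvScanBack (layout : List Int) (lvl : Int) : Nat → Option Nat
  | 0 => none
  | j + 1 => if layout.getD j 0 < lvl then some j else pvScanBack layout lvl j

def pvParent (layout : List Int) (i : Nat) : Option Nat :=
  pvScanBack layout (layout.getD i 0) i

theorem pvScanBack_lt {layout : List Int} {lvl : Int} {i j : Nat}
    (h : pvScanBack layout lvl i = some j) : j < i := by
  induction i with
  | zero => simp [pvScanBack] at h
  | succ k ih =>
      unfold pvScanBack at h
      split at h
      · cases h; omega
      · exact Nat.lt_succ_of_lt (ih h)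

theorem pvParent_lt {layout : List Int} {i j : Nat}
    (h : pvParent layout i = some j) : j < i := pvScanBack_lt h

-- the ancestor chain of i under pvParent (top of A's stack first)
def ancChain (layout : List Int) (i : Nat) : List Nat :=
  i :: (match h : pvParent layout i with
        | none => []
        | some j => ancChain layout j)
termination_by i
decreasing_by exact pvParent_lt h

theorem pvScanBack_succ (layout : List Int) (lvl : Int) (j : Nat) :
    pvScanBack layout lvl (j + 1) =
      if layout.getD j 0 < lvl then some j else pvScanBack layout lvl j := rfl

theorem pvStep_eq (layout : List Int) (R : List (List Int)) (s : List Nat) (i : Nat) :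
    pvStep layout (R, s) i =
      match pvFindPop layout (layout.getD i 0) s with
      | none => (R, i :: s)
      | some (j, s') => (pvSet1 (pvSet1 R i j) j i, i :: s') := rfl

theorem ancChain_none {layout : List Int} {i : Nat} (h : pvParent layout i = none) :
    ancChain layout i = [i] := by
  rw [ancChain]; split <;> simp_all

theorem ancChain_some {layout : List Int} {i j : Nat} (h : pvParent layout i = some j) :
    ancChain layout i = i :: ancChain layout j := by
  rw [ancChain]; split <;> simp_all

theorem pvScanBack_none_iff {layout : List Int} {lvl : Int} {i : Nat} :
    pvScanBack layout lvl i = none ↔ ∀ j < i, ¬ layout.getD j 0 < lvl := by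
  induction i with
  | zero => simp [pvScanBack]
  | succ k ih =>
      unfold pvScanBack
      split
      · constructor
        · intro h; cases h
        · intro h; exact absurd (by assumption) (h k (Nat.lt_succ_self k))
      · rw [ih]
        constructor
        · intro h j hj
          rcases Nat.lt_succ_iff_lt_or_eq.mp hj with hlt | rfl
          · exact h j hlt
          · assumption
        · intro h j hj; exact h j (Nat.lt_succ_of_lt hj)

theorem pvScanBack_some {layout : List Int} {lvl : Int} {i j : Nat}
    (h : pvScanBack layout lvl i = some j) :
    layout.getD j 0 < lvl ∧ ∀ k, j < k → k < i → ¬ layout.getD k 0 < lvl := by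
  induction i with
  | zero => simp [pvScanBack] at h
  | succ k ih =>
      unfold pvScanBack at h
      split at h
      · cases h
        refine ⟨by assumption, ?_⟩
        intro k hk hk'; omega
      · obtain ⟨h1, h2⟩ := ih h
        refine ⟨h1, ?_⟩
        intro m hm hm'
        rcases Nat.lt_succ_iff_lt_or_eq.mp hm' with hlt | rfl
        · exact h2 m hm hlt
        · assumption

theorem pvScanBack_skip {layout : List Int} {lvl : Int} {i p : Nat}
    (hpi : p ≤ i) (h : ∀ k, p ≤ k → k < i → ¬ layout.getD k 0 < lvl) :
    pvScanBack layout lvl i = pvScanBack layout lvl p := by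
  induction i with
  | zero => cases Nat.le_zero.mp hpi; rfl
  | succ k ih =>
      rcases Nat.lt_succ_iff_lt_or_eq.mp (Nat.lt_succ_of_le hpi) with hlt | rfl
      · have hpk : p ≤ k := Nat.lt_succ_iff.mp hlt
        rw [pvScanBack_succ, if_neg (h k hpk (Nat.lt_succ_self k))]
        exact ih hpk (fun m hm hm' => h m hm (Nat.lt_succ_of_lt hm'))
      · rfl

-- A's while loop over the ancestor chain computes exactly B's backward scan
theorem pvFindPop_chain (layout : List Int) (lvl : Int) (i : Nat) :
    pvFindPop layout lvl (ancChain layout i) =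
      (match pvScanBack layout lvl (i + 1) with
       | none => none
       | some j => some (j, ancChain layout j)) := by
  induction i using Nat.strong_induction_on with
  | _ i IH =>
    cases hp : pvParent layout i with
    | none =>
        rw [ancChain_none hp]
        unfold pvFindPop
        by_cases hge : layout.getD i 0 ≥ lvl
        · rw [if_pos hge]
          have hn : pvScanBack layout lvl (i + 1) = none := by
            rw [pvScanBack_none_iff]
            intro j hj
            rcases Nat.lt_succ_iff_lt_or_eq.mp hj with hlt | rfl
            · have := pvScanBack_none_iff.mp hp j hlt
              intro hc; exact this (lt_of_lt_of_le hc hge)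
            · omega
          rw [hn]; rfl
        · rw [if_neg hge]
          have hs : pvScanBack layout lvl (i + 1) = some i := by
            rw [pvScanBack_succ, if_pos (by omega)]
          rw [hs]; simp [ancChain_none hp]
    | some p =>
        rw [ancChain_some hp]
        unfold pvFindPop
        by_cases hge : layout.getD i 0 ≥ lvl
        · rw [if_pos hge]
          have hskip : pvScanBack layout lvl (i + 1) = pvScanBack layout lvl (p + 1) := by
            apply pvScanBack_skip (by have := pvParent_lt hp; omega)
            intro k hk hk'
            rcases Nat.lt_succ_iff_lt_or_eq.mp hk' with hlt | rfl
            · have := (pvScanBack_some hp).2 k (by omega) hlt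
              intro hc; exact this (lt_of_lt_of_le hc hge)
            · omega
          rw [hskip]
          exact IH p (pvParent_lt hp)
        · rw [if_neg hge]
          have hs : pvScanBack layout lvl (i + 1) = some i := by
            rw [pvScanBack_succ, if_pos (by omega)]
          rw [hs]; simp [ancChain_some hp]

-- the matrix after the first m iterations, pointwise
def pvEntry (layout : List Int) (m r c : Nat) : Int :=
  if (pvParent layout r = some c ∧ r < m) ∨ (pvParent layout c = some r ∧ c < m) then 1 else 0

def pvMatAt (layout : List Int) (m : Nat) : List (List Int) :=
  (List.range layout.length).map (fun r =>
    (List.range layout.length).map (fun c => pvEntry layout m r c))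

theorem pvParent_zero (layout : List Int) : pvParent layout 0 = none := rfl

theorem pvMatAt_zero (layout : List Int) :
    pvMatAt layout 0 = (List.range layout.length).map (fun _ => List.replicate layout.length (0 : Int)) := by
  unfold pvMatAt pvEntry
  simp

theorem pvMatAt_one (layout : List Int) : pvMatAt layout 1 = pvMatAt layout 0 := by
  unfold pvMatAt pvEntry
  apply List.map_congr_left; intro r _
  apply List.map_congr_left; intro c _
  congr 1
  simp only [eq_iff_iff]
  constructor
  · rintro (⟨h1, h2⟩ | ⟨h1, h2⟩)
    · interval_cases r
      · rw [pvParent_zero] at h1; cases h1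
    · interval_cases c
      · rw [pvParent_zero] at h1; cases h1
  · rintro (⟨_, h⟩ | ⟨_, h⟩) <;> omega

theorem pvMatAt_length (layout : List Int) (m : Nat) :
    (pvMatAt layout m).length = layout.length := by simp [pvMatAt]

theorem pvMatAt_getD {layout : List Int} {m k : Nat} (hk : k < layout.length) :
    (pvMatAt layout m).getD k [] =
      (List.range layout.length).map (fun c => pvEntry layout m k c) := by
  rw [List.getD_eq_getElem _ _ (by rw [pvMatAt_length]; exact hk)]
  simp [pvMatAt]

theorem pvGetD_set_ne {l : List (List Int)} {i k : Nat} {a : List Int}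
    (h : i ≠ k) (hk : k < l.length) : (l.set i a).getD k [] = l.getD k [] := by
  rw [List.getD_eq_getElem _ _ (by simpa using hk), List.getD_eq_getElem _ _ hk]
  exact List.getElem_set_ne h _

theorem pvEntry_succ {layout : List Int} {m j : Nat}
    (hp : pvParent layout m = some j) (r c : Nat) :
    pvEntry layout (m + 1) r c =
      if (r = m ∧ c = j) ∨ (r = j ∧ c = m) then 1 else pvEntry layout m r c := by
  unfold pvEntry
  by_cases h : (r = m ∧ c = j) ∨ (r = j ∧ c = m)
  · rw [if_pos h]
    rcases h with ⟨rfl, rfl⟩ | ⟨rfl, rfl⟩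
    · rw [if_pos (Or.inl ⟨hp, Nat.lt_succ_self r⟩)]
    · rw [if_pos (Or.inr ⟨hp, Nat.lt_succ_self c⟩)]
  · rw [if_neg h]
    congr 1
    simp only [eq_iff_iff]
    constructor
    · rintro (⟨h1, h2⟩ | ⟨h1, h2⟩)
      · rcases Nat.lt_succ_iff_lt_or_eq.mp h2 with hlt | rfl
        · exact Or.inl ⟨h1, hlt⟩
        · rw [hp] at h1; cases h1; exact absurd (Or.inl ⟨rfl, rfl⟩) h
      · rcases Nat.lt_succ_iff_lt_or_eq.mp h2 with hlt | rfl
        · exact Or.inr ⟨h1, hlt⟩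
        · rw [hp] at h1; cases h1; exact absurd (Or.inr ⟨rfl, rfl⟩) h
    · rintro (⟨h1, h2⟩ | ⟨h1, h2⟩)
      · exact Or.inl ⟨h1, by omega⟩
      · exact Or.inr ⟨h1, by omega⟩

theorem pvMatAt_succ {layout : List Int} {m j : Nat}
    (hp : pvParent layout m = some j) (hm : m < layout.length) :
    pvSet1 (pvSet1 (pvMatAt layout m) m j) j m = pvMatAt layout (m + 1) := by
  have hjm : j < m := pvParent_lt hp
  have hjn : j < layout.length := by omega
  have hA2 : pvSet1 (pvSet1 (pvMatAt layout m) m j) j m =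
      ((pvMatAt layout m).set m
          (((List.range layout.length).map (fun c => pvEntry layout m m c)).set j 1)).set j
        (((List.range layout.length).map (fun c => pvEntry layout m j c)).set m 1) := by
    unfold pvSet1
    rw [pvMatAt_getD hm, pvGetD_set_ne (by omega) (by rw [pvMatAt_length]; exact hjn),
      pvMatAt_getD hjn]
  rw [hA2]
  apply List.ext_getElem
  · simp [pvMatAt]
  intro r h1 h2
  have hrn : r < layout.length := by
    rw [pvMatAt_length] at h2; exact h2
  simp only [List.getElem_set]
  by_cases hjr : j = r
  · rw [if_pos hjr]
    subst hjr
    apply List.ext_getElem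
    · simp [pvMatAt]
    intro c hc1 hc2
    have hcn : c < layout.length := by simpa using hc1
    simp only [List.getElem_set, pvMatAt, List.getElem_map, List.getElem_range]
    rw [pvEntry_succ hp]
    by_cases hmc : m = c
    · rw [if_pos hmc, if_pos (Or.inr ⟨rfl, hmc.symm⟩)]
    · rw [if_neg hmc, if_neg (by omega)]
  · rw [if_neg hjr]
    by_cases hmr : m = r
    · rw [if_pos hmr]
      subst hmr
      apply List.ext_getElem
      · simp [pvMatAt]
      intro c hc1 hc2
      have hcn : c < layout.length := by simpa using hc1
      simp only [List.getElem_set, pvMatAt, List.getElem_map, List.getElem_range]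
      rw [pvEntry_succ hp]
      by_cases hjc : j = c
      · rw [if_pos hjc, if_pos (Or.inl ⟨rfl, hjc.symm⟩)]
      · rw [if_neg hjc, if_neg (by omega)]
    · rw [if_neg hmr]
      simp only [pvMatAt, List.getElem_map, List.getElem_range]
      apply List.map_congr_left
      intro c hc
      rw [pvEntry_succ hp, if_neg (by omega)]

-- the loop invariant: after m iterations the state is (pvMatAt m, ancestor chain of m-1)
theorem pvFold_inv {layout : List Int} (hpre : Pre_layout_to_matrix_py layout) :
    ∀ m, m ≤ layout.length →
    (List.range m).foldl (pvStep layout)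
        ((List.range layout.length).map (fun _ => List.replicate layout.length (0 : Int)), ([] : List Nat)) =
      (pvMatAt layout m, if m = 0 then [] else ancChain layout (m - 1)) := by
  intro m
  induction m with
  | zero => intro _; simp [pvMatAt_zero]
  | succ m ih =>
      intro hm
      rw [List.range_succ, List.foldl_append, ih (by omega)]
      simp only [List.foldl_cons, List.foldl_nil]
      cases m with
      | zero =>
          rw [if_pos rfl, pvStep_eq]
          simp [pvFindPop, pvMatAt_one, ancChain_none (pvParent_zero layout)]
      | succ k =>
          rw [if_neg (Nat.succ_ne_zero k), Nat.add_sub_cancel, pvStep_eq, pvFindPop_chain]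
          have hk1 : k + 1 < layout.length := by omega
          obtain ⟨j0, hj0, hlt0⟩ := hpre (k + 1) hk1 (Nat.succ_pos k)
          have hsome : ∃ j, pvParent layout (k + 1) = some j := by
            cases hps : pvParent layout (k + 1) with
            | none => exact absurd hlt0 (pvScanBack_none_iff.mp hps j0 hj0)
            | some j => exact ⟨j, rfl⟩
          obtain ⟨j, hj⟩ := hsome
          rw [show pvScanBack layout (layout.getD (k+1) 0) (k + 1) = some j from hj]
          simp only [pvMatAt_succ hj hk1]
          simp [ancChain_some hj]

theorem pvCands_getLast? (layout : List Int) (lvl : Int) (m : Nat) :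
    ((List.range m).filter (fun j => layout.getD j 0 < lvl)).getLast? =
      pvScanBack layout lvl m := by
  induction m with
  | zero => rfl
  | succ k ih =>
      rw [List.range_succ, List.filter_append, List.getLast?_append, pvScanBack_succ]
      by_cases h : layout.getD k 0 < lvl
      · rw [if_pos h,
          show List.filter (fun j => decide (layout.getD j 0 < lvl)) [k] = [k] from by
            rw [List.getD_eq_getElem?_getD] at h; simp [h]]
        rfl
      · rw [if_neg h,
          show List.filter (fun j => decide (layout.getD j 0 < lvl)) [k] = [] from by
            rw [List.getD_eq_getElem?_getD] at h; simp [h]]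
        simpa using ih

-- B's loop invariant: after the iterations i = 1 … m-1 the matrix is pvMatAt m
theorem pvAltFold_inv {layout : List Int} (hpre : Pre_layout_to_matrix_py layout) :
    ∀ m, 1 ≤ m → m ≤ layout.length →
    (List.range' 1 (m - 1)).foldl (fun R i =>
        match (pvCands layout i).getLast? with
        | none => R
        | some j => pvSet1 (pvSet1 R i j) j i)
      ((List.range layout.length).map (fun _ => List.replicate layout.length (0 : Int))) =
      pvMatAt layout m := by
  intro m
  induction m with
  | zero => omega
  | succ m ih =>
      intro _ hm
      cases Nat.eq_or_lt_of_le (show 1 ≤ m + 1 by omega) with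
      | inl h =>
          rw [← h, pvMatAt_one, pvMatAt_zero]
          rfl
      | inr h =>
          have hm1 : 1 ≤ m := by omega
          rw [show m + 1 - 1 = (m - 1) + 1 by omega, List.range'_concat,
            List.foldl_append, ih hm1 (by omega)]
          rw [show 1 + 1 * (m - 1) = m by omega]
          simp only [List.foldl_cons, List.foldl_nil]
          obtain ⟨j0, hj0, hlt0⟩ := hpre m (by omega) (by omega)
          have hsome : ∃ j, pvParent layout m = some j := by
            cases hps : pvParent layout m with
            | none => exact absurd hlt0 (pvScanBack_none_iff.mp hps j0 hj0)
            | some j => exact ⟨j, rfl⟩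
          obtain ⟨j, hj⟩ := hsome
          rw [pvCands, pvCands_getLast?,
            show pvScanBack layout (layout.getD m 0) m = some j from hj]
          exact pvMatAt_succ hj (by omega)

theorem alt_eq_matAt {layout : List Int} (hpre : Pre_layout_to_matrix_py layout) :
    layout_to_matrix_py_alt layout = pvMatAt layout layout.length := by
  show (List.range' 1 (layout.length - 1)).foldl _
      ((List.range layout.length).map (fun _ => List.replicate layout.length (0 : Int))) =
    pvMatAt layout layout.length
  cases hn : layout.length with
  | zero =>
      have : layout = [] := List.length_eq_zero_iff.mp hn
      subst this; rfl
  | succ k =>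
      rw [← hn]
      exact pvAltFold_inv hpre layout.length (by omega) (Nat.le_refl _)

theorem layout_to_matrix_py_spec : Claim_equal_layout_to_matrix_py := by
  intro layout _ hpre
  unfold Spec_layout_to_matrix_py
  rw [alt_eq_matAt hpre]
  show ((List.range layout.length).foldl (pvStep layout)
      ((List.range layout.length).map (fun _ => List.replicate layout.length (0 : Int)), ([] : List Nat))).1 =
    pvMatAt layout layout.length
  rw [pvFold_inv hpre layout.length (Nat.le_refl _)]
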